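-- pv_equiv track=rewrite | github.com/amurciegorico/advent_of_code_2020 | day24/puzzle2.py | get_tile_coordinate
-- ===== SOURCE A (Python) =====
-- def get_tile_coordinate(data):
--     index = 0
--     current_tile = (0, 0)
--     while index < len(data):
--         if data[index] == 'e':
--             current_tile = (current_tile[0] - 1, current_tile[1])
--         elif data[index] == 'w':
--             current_tile = (current_tile[0] + 1, current_tile[1])
--         elif data[index] == 's':
--             index += 1
--             if data[index] == 'e':
--                 if current_tile[1] % 2 == 0:
--                     current_tile = (current_tile[0] - 1, current_tile[1] + 1)
--                 else:
--                     current_tile = (current_tile[0], current_tile[1] + 1)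
--             elif data[index] == 'w':
--                 if current_tile[1] % 2 == 0:
--                     current_tile = (current_tile[0], current_tile[1] + 1)
--                 else:
--                     current_tile = (current_tile[0] + 1, current_tile[1] + 1)
--         elif data[index] == 'n':
--             index += 1
--             if data[index] == 'e':
--                 if current_tile[1] % 2 == 0:
--                     current_tile = (current_tile[0] - 1, current_tile[1] - 1)
--                 else:
--                     current_tile = (current_tile[0], current_tile[1] - 1)
--             elif data[index] == 'w':
--                 if current_tile[1] % 2 == 0:
--                     current_tile = (current_tile[0], current_tile[1] - 1)
--                 else:
--                     current_tile = (current_tile[0] + 1, current_tile[1] - 1)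
--         index += 1
--     return current_tile
-- ===== SOURCE B (Python) =====
-- # Doubled-coordinate rewrite: tokenize the string ('s'/'n' grab the next char),
-- # look each token up in a fixed delta table on doubled axial coordinates (no
-- # parity branching), and convert back to A's representation at the end.
-- _DELTAS = {'e': (-2, 0), 'w': (2, 0),
--            'se': (-1, 1), 'sw': (1, 1),
--            'ne': (-1, -1), 'nw': (1, -1)}
--
-- def get_tile_coordinate(data):
--     h = 0
--     y = 0
--     i = 0
--     while i < len(data):
--         c = data[i]
--         if c == 's' or c == 'n':
--             tok = c + data[i + 1]
--             i += 2
--         else: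
--             tok = c
--             i += 1
--         dh, dy = _DELTAS.get(tok, (0, 0))
--         h += dh
--         y += dy
--     return ((h - y % 2) // 2, y)
-- ===== Notes on version B (the rewrite author's own statement) =====
-- stated objective: simpler
-- what changed: B replaces the parity-branched coordinate updates by a token lookup in a fixed delta table over doubled coordinates, converting back to A's offset representation once at the end.
-- outside the precondition, e.g. on get_tile_coordinate('s'): A raises IndexError, B raises IndexError; on get_tile_coordinate('n'): A raises IndexError, B raises IndexError
import Mathlib
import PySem

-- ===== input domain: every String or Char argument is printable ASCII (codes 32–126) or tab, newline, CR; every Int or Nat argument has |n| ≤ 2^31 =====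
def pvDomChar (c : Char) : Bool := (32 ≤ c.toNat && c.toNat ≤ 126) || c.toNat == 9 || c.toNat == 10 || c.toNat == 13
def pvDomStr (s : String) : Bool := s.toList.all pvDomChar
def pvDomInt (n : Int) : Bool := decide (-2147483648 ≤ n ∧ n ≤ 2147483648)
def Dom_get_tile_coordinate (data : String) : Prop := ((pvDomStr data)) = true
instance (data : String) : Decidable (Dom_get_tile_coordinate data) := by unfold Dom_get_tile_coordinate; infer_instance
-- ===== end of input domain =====

-- B keeps A's tokenizing loop but replaces the parity-branched moves by fixed deltas on
-- doubled coordinates, converting back at the end (objective: simpler).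
-- Equivalence is about the RETURN value; neither program mutates its argument.

-- ===== PORT A =====
-- A's while loop over an index: structural recursion on the remaining characters;
-- 's'/'n' consume the next character too (IndexError when there is none — outside Pre_,
-- where the port returns the current tile).
def pvLoopA : List Char → Int × Int → Int × Int
  | [], t => t
  | c :: rest, (x, y) =>
    if c = 'e' then pvLoopA rest (x - 1, y)
    else if c = 'w' then pvLoopA rest (x + 1, y)
    else if c = 's' then
      match rest with
      | [] => (x, y)  -- Python raises IndexError here; excluded by Pre_
      | d :: rest' =>
        if d = 'e' then
          if PySem.Int.mod y 2 = 0 then pvLoopA rest' (x - 1, y + 1)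
          else pvLoopA rest' (x, y + 1)
        else if d = 'w' then
          if PySem.Int.mod y 2 = 0 then pvLoopA rest' (x, y + 1)
          else pvLoopA rest' (x + 1, y + 1)
        else pvLoopA rest' (x, y)
    else if c = 'n' then
      match rest with
      | [] => (x, y)  -- Python raises IndexError here; excluded by Pre_
      | d :: rest' =>
        if d = 'e' then
          if PySem.Int.mod y 2 = 0 then pvLoopA rest' (x - 1, y - 1)
          else pvLoopA rest' (x, y - 1)
        else if d = 'w' then
          if PySem.Int.mod y 2 = 0 then pvLoopA rest' (x, y - 1)
          else pvLoopA rest' (x + 1, y - 1)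
        else pvLoopA rest' (x, y)
    else pvLoopA rest (x, y)

def get_tile_coordinate (data : String) : Int × Int :=
  pvLoopA data.toList (0, 0)

-- ===== PORT B =====
-- the dict literal _DELTAS of Source B
def pvDeltas : PySem.Dict String (Int × Int) :=
  PySem.Dict.ofList [("e", (-2, 0)), ("w", (2, 0)),
                     ("se", (-1, 1)), ("sw", (1, 1)),
                     ("ne", (-1, -1)), ("nw", (1, -1))]

-- Source B's while loop: build the token, look it up with .get(tok, (0,0)), add the delta.
def pvLoopB : List Char → Int → Int → Int × Int
  | [], h, y => (h, y)
  | c :: rest, h, y =>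
    if c = 's' ∨ c = 'n' then
      match rest with
      | [] => (h, y)  -- Python raises IndexError here; excluded by Pre_
      | d :: rest' =>
        let dd := PySem.Dict.getD pvDeltas (String.ofList [c, d]) (0, 0)
        pvLoopB rest' (h + dd.1) (y + dd.2)
    else
      let dd := PySem.Dict.getD pvDeltas (String.ofList [c]) (0, 0)
      pvLoopB rest (h + dd.1) (y + dd.2)

def get_tile_coordinate_alt (data : String) : Int × Int :=
  let hy := pvLoopB data.toList 0 0
  (PySem.Int.floordiv (hy.1 - PySem.Int.mod hy.2 2) 2, hy.2)

-- ===== PRECONDITION & SPEC =====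
-- Pre_ excludes exactly the inputs on which A raises IndexError: the scan reaches a trailing
-- 's'/'n' with no following character, which happens precisely when the maximal suffix of
-- 's'/'n' characters has odd length.
def Pre_get_tile_coordinate (data : String) : Prop :=
  (data.toList.reverse.takeWhile (fun c => c = 's' ∨ c = 'n')).length % 2 = 0
instance (data : String) : Decidable (Pre_get_tile_coordinate data) := by
  unfold Pre_get_tile_coordinate; infer_instance

def pvWitness_get_tile_coordinate : String := "senw"

def Spec_get_tile_coordinate (data : String) (out : Int × Int) : Prop := out = get_tile_coordinate_alt data
instance (data : String) (out : Int × Int) : Decidable (Spec_get_tile_coordinate data out) := by unfold Spec_get_tile_coordinate; infer_instance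

-- ===== CLAIM (what is proved, stated in full; the proofs are below) =====
def Claim_equal_get_tile_coordinate : Prop := ∀ (data : String), Dom_get_tile_coordinate data → Pre_get_tile_coordinate data → Spec_get_tile_coordinate data (get_tile_coordinate data)

-- ===== LEMMAS AND PROOFS =====

-- conversion from doubled coordinates back to A's representation
def pvConv (t : Int × Int) : Int × Int :=
  (PySem.Int.floordiv (t.1 - PySem.Int.mod t.2 2) 2, t.2)

theorem pvMod2 (y : Int) : PySem.Int.mod y 2 = y % 2 :=
  PySem.Int.mod_eq_emod_of_pos (by omega)

theorem pvConv_pair (x y : Int) : pvConv (2 * x + PySem.Int.mod y 2, y) = (x, y) := by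
  simp only [pvConv, pvMod2, Prod.mk.injEq]
  refine ⟨?_, trivial⟩
  rw [PySem.Int.floordiv_eq_ediv_of_pos (by omega)]
  omega

theorem pvItems : pvDeltas.items = [("e", (-2, 0)), ("w", (2, 0)),
    ("se", (-1, 1)), ("sw", (1, 1)), ("ne", (-1, -1)), ("nw", (1, -1))] := by decide

theorem pvGetD_default (c d : Char) (he : d ≠ 'e') (hw : d ≠ 'w') :
    PySem.Dict.getD pvDeltas (String.ofList [c, d]) (0, 0) = (0, 0) := by
  have h1 : ¬ (("se" : String) = String.ofList [c, d]) := by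
    intro h; apply he; have := congrArg String.toList h.symm; simp at this; exact this.2
  have h2 : ¬ (("sw" : String) = String.ofList [c, d]) := by
    intro h; apply hw; have := congrArg String.toList h.symm; simp at this; exact this.2
  have h3 : ¬ (("ne" : String) = String.ofList [c, d]) := by
    intro h; apply he; have := congrArg String.toList h.symm; simp at this; exact this.2
  have h4 : ¬ (("nw" : String) = String.ofList [c, d]) := by
    intro h; apply hw; have := congrArg String.toList h.symm; simp at this; exact this.2
  have h5 : ¬ (("e" : String) = String.ofList [c, d]) := by
    intro h; have := congrArg String.toList h.symm; simp at this
  have h6 : ¬ (("w" : String) = String.ofList [c, d]) := by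
    intro h; have := congrArg String.toList h.symm; simp at this
  have b1 : (("se" : String) == String.ofList [c, d]) = false := beq_eq_false_iff_ne.mpr h1
  have b2 : (("sw" : String) == String.ofList [c, d]) = false := beq_eq_false_iff_ne.mpr h2
  have b3 : (("ne" : String) == String.ofList [c, d]) = false := beq_eq_false_iff_ne.mpr h3
  have b4 : (("nw" : String) == String.ofList [c, d]) = false := beq_eq_false_iff_ne.mpr h4
  have b5 : (("e" : String) == String.ofList [c, d]) = false := beq_eq_false_iff_ne.mpr h5
  have b6 : (("w" : String) == String.ofList [c, d]) = false := beq_eq_false_iff_ne.mpr h6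
  simp [PySem.Dict.getD, PySem.Dict.get?, pvItems, List.find?, b1, b2, b3, b4, b5, b6]

theorem pvGetD_single (c : Char) (he : c ≠ 'e') (hw : c ≠ 'w') :
    PySem.Dict.getD pvDeltas (String.ofList [c]) (0, 0) = (0, 0) := by
  have h5 : ¬ (("e" : String) = String.ofList [c]) := by
    intro h; apply he; have := congrArg String.toList h.symm; simp at this; exact this
  have h6 : ¬ (("w" : String) = String.ofList [c]) := by
    intro h; apply hw; have := congrArg String.toList h.symm; simp at this; exact this
  have h1 : ¬ (("se" : String) = String.ofList [c]) := by
    intro h; have := congrArg String.toList h.symm; simp at this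
  have h2 : ¬ (("sw" : String) = String.ofList [c]) := by
    intro h; have := congrArg String.toList h.symm; simp at this
  have h3 : ¬ (("ne" : String) = String.ofList [c]) := by
    intro h; have := congrArg String.toList h.symm; simp at this
  have h4 : ¬ (("nw" : String) = String.ofList [c]) := by
    intro h; have := congrArg String.toList h.symm; simp at this
  have b1 : (("se" : String) == String.ofList [c]) = false := beq_eq_false_iff_ne.mpr h1
  have b2 : (("sw" : String) == String.ofList [c]) = false := beq_eq_false_iff_ne.mpr h2
  have b3 : (("ne" : String) == String.ofList [c]) = false := beq_eq_false_iff_ne.mpr h3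
  have b4 : (("nw" : String) == String.ofList [c]) = false := beq_eq_false_iff_ne.mpr h4
  have b5 : (("e" : String) == String.ofList [c]) = false := beq_eq_false_iff_ne.mpr h5
  have b6 : (("w" : String) == String.ofList [c]) = false := beq_eq_false_iff_ne.mpr h6
  simp [PySem.Dict.getD, PySem.Dict.get?, pvItems, List.find?, b1, b2, b3, b4, b5, b6]


-- main invariant: A's loop equals B's loop on doubled coordinates, converted back
theorem pvLoop_eq : ∀ (n : Nat) (cs : List Char), cs.length ≤ n → ∀ (x y : Int),
    pvLoopA cs (x, y) = pvConv (pvLoopB cs (2 * x + PySem.Int.mod y 2) y) := by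
  intro n
  induction n with
  | zero =>
    intro cs hcs x y
    have h0 : cs = [] := by cases cs <;> simp_all
    subst h0
    exact (pvConv_pair x y).symm
  | succ n ih =>
    intro cs hcs x y
    match cs with
    | [] => exact (pvConv_pair x y).symm
    | c :: rest =>
      by_cases hce : c = 'e'
      · subst hce
        have hlen : rest.length ≤ n := by simpa using hcs
        have lhs : pvLoopA ('e' :: rest) (x, y) = pvLoopA rest (x - 1, y) := by rw [pvLoopA.eq_def]; rfl
        have rhs : pvLoopB ('e' :: rest) (2 * x + PySem.Int.mod y 2) y
            = pvLoopB rest (2 * x + PySem.Int.mod y 2 + -2) (y + 0) := by rw [pvLoopB.eq_def]; rfl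
        rw [lhs, rhs, show 2 * x + PySem.Int.mod y 2 + -2 = 2 * (x - 1) + PySem.Int.mod y 2 by ring,
            add_zero]
        exact ih rest hlen (x - 1) y
      · by_cases hcw : c = 'w'
        · subst hcw
          have hlen : rest.length ≤ n := by simpa using hcs
          have lhs : pvLoopA ('w' :: rest) (x, y) = pvLoopA rest (x + 1, y) := by rw [pvLoopA.eq_def]; rfl
          have rhs : pvLoopB ('w' :: rest) (2 * x + PySem.Int.mod y 2) y
              = pvLoopB rest (2 * x + PySem.Int.mod y 2 + 2) (y + 0) := by rw [pvLoopB.eq_def]; rfl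
          rw [lhs, rhs, show 2 * x + PySem.Int.mod y 2 + 2 = 2 * (x + 1) + PySem.Int.mod y 2 by ring,
              add_zero]
          exact ih rest hlen (x + 1) y
        · by_cases hcs' : c = 's'
          · subst hcs'
            match rest with
            | [] => exact (pvConv_pair x y).symm
            | d :: rest' =>
              have hlen : rest'.length ≤ n := by simp at hcs; omega
              by_cases hde : d = 'e'
              · subst hde
                have lhs : pvLoopA ('s' :: 'e' :: rest') (x, y)
                    = if PySem.Int.mod y 2 = 0 then pvLoopA rest' (x - 1, y + 1)
                      else pvLoopA rest' (x, y + 1) := by rw [pvLoopA.eq_def]; rfl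
                have rhs : pvLoopB ('s' :: 'e' :: rest') (2 * x + PySem.Int.mod y 2) y
                    = pvLoopB rest' (2 * x + PySem.Int.mod y 2 + -1) (y + 1) := by rw [pvLoopB.eq_def]; rfl
                rw [lhs, rhs]
                by_cases hm : PySem.Int.mod y 2 = 0
                · rw [if_pos hm, show 2 * x + PySem.Int.mod y 2 + -1
                      = 2 * (x - 1) + PySem.Int.mod (y + 1) 2 by simp only [pvMod2] at hm ⊢; omega]
                  exact ih rest' hlen (x - 1) (y + 1)
                · rw [if_neg hm, show 2 * x + PySem.Int.mod y 2 + -1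
                      = 2 * x + PySem.Int.mod (y + 1) 2 by simp only [pvMod2] at hm ⊢; omega]
                  exact ih rest' hlen x (y + 1)
              · by_cases hdw : d = 'w'
                · subst hdw
                  have lhs : pvLoopA ('s' :: 'w' :: rest') (x, y)
                      = if PySem.Int.mod y 2 = 0 then pvLoopA rest' (x, y + 1)
                        else pvLoopA rest' (x + 1, y + 1) := by rw [pvLoopA.eq_def]; rfl
                  have rhs : pvLoopB ('s' :: 'w' :: rest') (2 * x + PySem.Int.mod y 2) y
                      = pvLoopB rest' (2 * x + PySem.Int.mod y 2 + 1) (y + 1) := by rw [pvLoopB.eq_def]; rfl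
                  rw [lhs, rhs]
                  by_cases hm : PySem.Int.mod y 2 = 0
                  · rw [if_pos hm, show 2 * x + PySem.Int.mod y 2 + 1
                        = 2 * x + PySem.Int.mod (y + 1) 2 by simp only [pvMod2] at hm ⊢; omega]
                    exact ih rest' hlen x (y + 1)
                  · rw [if_neg hm, show 2 * x + PySem.Int.mod y 2 + 1
                        = 2 * (x + 1) + PySem.Int.mod (y + 1) 2 by simp only [pvMod2] at hm ⊢; omega]
                    exact ih rest' hlen (x + 1) (y + 1)
                · have lhs : pvLoopA ('s' :: d :: rest') (x, y) = pvLoopA rest' (x, y) := by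
                    rw [pvLoopA.eq_def]
                    show (if d = 'e' then _ else if d = 'w' then _ else pvLoopA rest' (x, y)) = _
                    rw [if_neg hde, if_neg hdw]
                  have rhs : pvLoopB ('s' :: d :: rest') (2 * x + PySem.Int.mod y 2) y
                      = pvLoopB rest' (2 * x + PySem.Int.mod y 2 + 0) (y + 0) := by
                    rw [pvLoopB.eq_def]
                    show pvLoopB rest'
                        (2 * x + PySem.Int.mod y 2 + (PySem.Dict.getD pvDeltas (String.ofList ['s', d]) (0, 0)).1)
                        (y + (PySem.Dict.getD pvDeltas (String.ofList ['s', d]) (0, 0)).2) = _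
                    rw [pvGetD_default 's' d hde hdw]
                  rw [lhs, rhs, add_zero, add_zero]
                  exact ih rest' hlen x y
          · by_cases hcn : c = 'n'
            · subst hcn
              match rest with
              | [] => exact (pvConv_pair x y).symm
              | d :: rest' =>
                have hlen : rest'.length ≤ n := by simp at hcs; omega
                by_cases hde : d = 'e'
                · subst hde
                  have lhs : pvLoopA ('n' :: 'e' :: rest') (x, y)
                      = if PySem.Int.mod y 2 = 0 then pvLoopA rest' (x - 1, y - 1)
                        else pvLoopA rest' (x, y - 1) := by rw [pvLoopA.eq_def]; rfl
                  have rhs : pvLoopB ('n' :: 'e' :: rest') (2 * x + PySem.Int.mod y 2) y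
                      = pvLoopB rest' (2 * x + PySem.Int.mod y 2 + -1) (y + -1) := by rw [pvLoopB.eq_def]; rfl
                  rw [lhs, rhs, show y + -1 = y - 1 by ring]
                  by_cases hm : PySem.Int.mod y 2 = 0
                  · rw [if_pos hm, show 2 * x + PySem.Int.mod y 2 + -1
                        = 2 * (x - 1) + PySem.Int.mod (y - 1) 2 by simp only [pvMod2] at hm ⊢; omega]
                    exact ih rest' hlen (x - 1) (y - 1)
                  · rw [if_neg hm, show 2 * x + PySem.Int.mod y 2 + -1
                        = 2 * x + PySem.Int.mod (y - 1) 2 by simp only [pvMod2] at hm ⊢; omega]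
                    exact ih rest' hlen x (y - 1)
                · by_cases hdw : d = 'w'
                  · subst hdw
                    have lhs : pvLoopA ('n' :: 'w' :: rest') (x, y)
                        = if PySem.Int.mod y 2 = 0 then pvLoopA rest' (x, y - 1)
                          else pvLoopA rest' (x + 1, y - 1) := by rw [pvLoopA.eq_def]; rfl
                    have rhs : pvLoopB ('n' :: 'w' :: rest') (2 * x + PySem.Int.mod y 2) y
                        = pvLoopB rest' (2 * x + PySem.Int.mod y 2 + 1) (y + -1) := by rw [pvLoopB.eq_def]; rfl
                    rw [lhs, rhs, show y + -1 = y - 1 by ring]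
                    by_cases hm : PySem.Int.mod y 2 = 0
                    · rw [if_pos hm, show 2 * x + PySem.Int.mod y 2 + 1
                          = 2 * x + PySem.Int.mod (y - 1) 2 by simp only [pvMod2] at hm ⊢; omega]
                      exact ih rest' hlen x (y - 1)
                    · rw [if_neg hm, show 2 * x + PySem.Int.mod y 2 + 1
                          = 2 * (x + 1) + PySem.Int.mod (y - 1) 2 by simp only [pvMod2] at hm ⊢; omega]
                      exact ih rest' hlen (x + 1) (y - 1)
                  · have lhs : pvLoopA ('n' :: d :: rest') (x, y) = pvLoopA rest' (x, y) := by
                      rw [pvLoopA.eq_def]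
                      show (if d = 'e' then _ else if d = 'w' then _ else pvLoopA rest' (x, y)) = _
                      rw [if_neg hde, if_neg hdw]
                    have rhs : pvLoopB ('n' :: d :: rest') (2 * x + PySem.Int.mod y 2) y
                        = pvLoopB rest' (2 * x + PySem.Int.mod y 2 + 0) (y + 0) := by
                      rw [pvLoopB.eq_def]
                      show pvLoopB rest'
                          (2 * x + PySem.Int.mod y 2 + (PySem.Dict.getD pvDeltas (String.ofList ['n', d]) (0, 0)).1)
                          (y + (PySem.Dict.getD pvDeltas (String.ofList ['n', d]) (0, 0)).2) = _
                      rw [pvGetD_default 'n' d hde hdw]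
                    rw [lhs, rhs, add_zero, add_zero]
                    exact ih rest' hlen x y
            · have hlen : rest.length ≤ n := by simpa using hcs
              have hsn : ¬ (c = 's' ∨ c = 'n') := by tauto
              have lhs : pvLoopA (c :: rest) (x, y) = pvLoopA rest (x, y) := by
                rw [pvLoopA.eq_def]
                show (if c = 'e' then _ else if c = 'w' then _ else if c = 's' then _
                      else if c = 'n' then _ else pvLoopA rest (x, y)) = _
                rw [if_neg hce, if_neg hcw, if_neg hcs', if_neg hcn]
              have rhs : pvLoopB (c :: rest) (2 * x + PySem.Int.mod y 2) y
                  = pvLoopB rest (2 * x + PySem.Int.mod y 2 + 0) (y + 0) := by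
                rw [pvLoopB.eq_def]
                show (if c = 's' ∨ c = 'n' then _
                      else pvLoopB rest
                        (2 * x + PySem.Int.mod y 2 + (PySem.Dict.getD pvDeltas (String.ofList [c]) (0, 0)).1)
                        (y + (PySem.Dict.getD pvDeltas (String.ofList [c]) (0, 0)).2)) = _
                rw [if_neg hsn, pvGetD_single c hce hcw]
              rw [lhs, rhs, add_zero, add_zero]
              exact ih rest hlen x y

-- ===== VERDICT (by name: the statement is the Claim_ definition above) =====
theorem get_tile_coordinate_spec : Claim_equal_get_tile_coordinate := by
  intro data _ _
  unfold Spec_get_tile_coordinate get_tile_coordinate get_tile_coordinate_alt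
  have := pvLoop_eq data.toList.length data.toList (le_refl _) 0 0
  simpa [pvConv] using this
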